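-- pv_equiv track=rewrite | github.com/francky91/TVC | tvc_V20.py | construire_club_counts
-- ===== SOURCE A (Python) =====
-- def construire_club_counts(pouleA, pouleB):
--     """
--     Retourne un dict : { "ClubX": [countEnA, countEnB], ... }
--     """
--     from collections import defaultdict
--     counts = defaultdict(lambda: [0,0])
--
--     # compter la poule A
--     for joueur in pouleA:
--         counts[joueur['club']][0] += 1
--
--     # compter la poule B
--     for joueur in pouleB:
--         counts[joueur['club']][1] += 1
--
--     return dict(counts)
-- ===== SOURCE B (Python) =====
-- def construire_club_counts(pouleA, pouleB):
--     """
--     Retourne un dict : { "ClubX": [countEnA, countEnB], ... }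
--     """
--     clubsA = [j['club'] for j in pouleA]
--     clubsB = [j['club'] for j in pouleB]
--     # first-encounter order of distinct clubs (A then B), no counting table at all
--     order = []
--     for c in clubsA + clubsB:
--         if c not in order:
--             order.append(c)
--     # brute-force per-club counting by scanning each pool list
--     return {c: [clubsA.count(c), clubsB.count(c)] for c in order}
-- ===== Notes on version B (the rewrite author's own statement) =====
-- stated objective: alternative
-- what changed: Drops A's shared mutable-count table entirely: B collects the distinct clubs in first-encounter order with an explicit membership loop, then brute-force counts each club by a full list.count scan of each pool (O(k*n) nested scans vs A's single O(n) hashed pass).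
import Mathlib
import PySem

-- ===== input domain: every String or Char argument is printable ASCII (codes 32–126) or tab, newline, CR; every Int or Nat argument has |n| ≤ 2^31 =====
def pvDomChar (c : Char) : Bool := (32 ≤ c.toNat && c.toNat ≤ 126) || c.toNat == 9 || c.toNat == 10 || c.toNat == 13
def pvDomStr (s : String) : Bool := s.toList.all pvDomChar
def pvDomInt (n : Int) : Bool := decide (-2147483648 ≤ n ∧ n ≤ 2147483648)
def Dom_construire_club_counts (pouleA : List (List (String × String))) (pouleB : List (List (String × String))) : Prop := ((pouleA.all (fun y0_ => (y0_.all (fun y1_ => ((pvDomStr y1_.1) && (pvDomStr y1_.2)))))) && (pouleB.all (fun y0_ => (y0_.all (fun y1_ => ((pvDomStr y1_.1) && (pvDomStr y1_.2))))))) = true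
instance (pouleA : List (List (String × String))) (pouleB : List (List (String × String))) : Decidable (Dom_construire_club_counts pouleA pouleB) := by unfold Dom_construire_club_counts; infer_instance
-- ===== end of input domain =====

-- B drops A's shared mutable-count table: it collects distinct clubs in first-encounter
-- order with an explicit membership loop, then counts each club by full list scans (alternative decomposition/algorithm, not faster).

-- joueur['club'] : lookup in the player dict (Pre_ guarantees the key is present, so getD "" is never the default)
def pvClub (joueur : List (String × String)) : String :=
  ((PySem.Dict.ofList joueur).get? "club").getD ""

-- ===== PORT A =====
def construire_club_counts (pouleA : List (List (String × String))) (pouleB : List (List (String × String))) : List (String × List Int) :=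
  let counts : PySem.Dict String (List Int) := PySem.Dict.empty
  -- compter la poule A : counts[joueur['club']][0] += 1  (value lists always have length 2)
  let counts := pouleA.foldl (fun d joueur =>
    d.modify (pvClub joueur) [0, 0] (fun v => [v.getD 0 0 + 1, v.getD 1 0])) counts
  -- compter la poule B : counts[joueur['club']][1] += 1
  let counts := pouleB.foldl (fun d joueur =>
    d.modify (pvClub joueur) [0, 0] (fun v => [v.getD 0 0, v.getD 1 0 + 1])) counts
  counts.items

-- ===== PORT B =====
def construire_club_counts_alt (pouleA : List (List (String × String))) (pouleB : List (List (String × String))) : List (String × List Int) :=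
  let clubsA := pouleA.map pvClub
  let clubsB := pouleB.map pvClub
  -- for c in clubsA + clubsB: if c not in order: order.append(c)
  let order := (clubsA ++ clubsB).foldl (fun acc c => if acc.contains c then acc else acc ++ [c]) []
  -- {c: [clubsA.count(c), clubsB.count(c)] for c in order}
  order.map (fun c => (c, [(clubsA.count c : Int), (clubsB.count c : Int)]))

-- ===== PRECONDITION & SPEC =====
-- Pre_ excludes exactly the inputs on which Python A raises KeyError: a player dict without key 'club'.
def Pre_construire_club_counts (pouleA : List (List (String × String))) (pouleB : List (List (String × String))) : Prop :=
  ∀ joueur ∈ pouleA ++ pouleB, "club" ∈ joueur.map (·.1)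
instance (pouleA : List (List (String × String))) (pouleB : List (List (String × String))) : Decidable (Pre_construire_club_counts pouleA pouleB) := by unfold Pre_construire_club_counts; infer_instance
def pvWitness_construire_club_counts : (List (List (String × String))) × (List (List (String × String))) :=
  ([[("club", "X")], [("club", "Y")]], [[("club", "X")]])

def Spec_construire_club_counts (pouleA : List (List (String × String))) (pouleB : List (List (String × String))) (out : List (String × List Int)) : Prop := out = construire_club_counts_alt pouleA pouleB
instance (pouleA : List (List (String × String))) (pouleB : List (List (String × String))) (out : List (String × List Int)) : Decidable (Spec_construire_club_counts pouleA pouleB out) := by unfold Spec_construire_club_counts; infer_instance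

-- ===== CLAIM (what is proved, stated in full; the proofs are below) =====
def Claim_equal_construire_club_counts : Prop := ∀ (pouleA : List (List (String × String))) (pouleB : List (List (String × String))), Dom_construire_club_counts pouleA pouleB → Pre_construire_club_counts pouleA pouleB → Spec_construire_club_counts pouleA pouleB (construire_club_counts pouleA pouleB)

-- ===== LEMMAS AND PROOFS =====

-- value of the A-side first pass at any key: adds la.count k to slot 0
theorem pv_getD_fold1 (l : List String) (d : PySem.Dict String (List Int))
    (h : ∀ j, ∃ a b : Int, d.getD j [0,0] = [a,b]) (k : String) :
    (l.foldl (fun d c => d.modify c [0,0] (fun v => [v.getD 0 0 + 1, v.getD 1 0])) d).getD k [0,0]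
      = [(d.getD k [0,0]).getD 0 0 + l.count k, (d.getD k [0,0]).getD 1 0] := by
  induction l generalizing d with
  | nil =>
      obtain ⟨a, b, hab⟩ := h k
      simp [hab]
  | cons c t ih =>
      simp only [List.foldl_cons]
      rw [ih]
      · rw [PySem.Dict.getD_modify]
        by_cases hkc : k = c
        · obtain ⟨a, b, hab⟩ := h k
          subst hkc
          simp [hab]
          omega
        · simp [hkc, Ne.symm hkc]
      · intro j
        rw [PySem.Dict.getD_modify]
        by_cases hjc : j = c
        · simp [hjc]
        · simp only [if_neg hjc]; exact h j

-- value of the second pass at any key: adds lb.count k to slot 1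
theorem pv_getD_fold2 (l : List String) (d : PySem.Dict String (List Int))
    (h : ∀ j, ∃ a b : Int, d.getD j [0,0] = [a,b]) (k : String) :
    (l.foldl (fun d c => d.modify c [0,0] (fun v => [v.getD 0 0, v.getD 1 0 + 1])) d).getD k [0,0]
      = [(d.getD k [0,0]).getD 0 0, (d.getD k [0,0]).getD 1 0 + l.count k] := by
  induction l generalizing d with
  | nil =>
      obtain ⟨a, b, hab⟩ := h k
      simp [hab]
  | cons c t ih =>
      simp only [List.foldl_cons]
      rw [ih]
      · rw [PySem.Dict.getD_modify]
        by_cases hkc : k = c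
        · obtain ⟨a, b, hab⟩ := h k
          subst hkc
          simp [hab]
          omega
        · simp [hkc, Ne.symm hkc]
      · intro j
        rw [PySem.Dict.getD_modify]
        by_cases hjc : j = c
        · simp [hjc]
        · simp only [if_neg hjc]; exact h j

-- B's first-encounter loop is exactly PySem.Set.ofList
theorem pv_order_eq_ofList (l : List String) :
    l.foldl (fun (acc : List String) c => if acc.contains c then acc else acc ++ [c]) []
      = PySem.Set.ofList l := rfl

-- ===== VERDICT (by name: the statement is the Claim_ definition above) =====
theorem construire_club_counts_spec : Claim_equal_construire_club_counts := by
  intro pouleA pouleB _ _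
  show construire_club_counts pouleA pouleB = construire_club_counts_alt pouleA pouleB
  simp only [construire_club_counts, construire_club_counts_alt]
  have e1 : List.foldl (fun (d : PySem.Dict String (List Int)) c => d.modify c [0,0] (fun v => [v.getD 0 0 + 1, v.getD 1 0])) PySem.Dict.empty (pouleA.map pvClub)
      = List.foldl (fun d j => d.modify (pvClub j) [0,0] (fun v => [v.getD 0 0 + 1, v.getD 1 0])) PySem.Dict.empty pouleA := by
    rw [List.foldl_map]
  have e2 : ∀ init : PySem.Dict String (List Int), List.foldl (fun d c => d.modify c [0,0] (fun v => [v.getD 0 0, v.getD 1 0 + 1])) init (pouleB.map pvClub)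
      = List.foldl (fun d j => d.modify (pvClub j) [0,0] (fun v => [v.getD 0 0, v.getD 1 0 + 1])) init pouleB := by
    intro init; rw [List.foldl_map]
  rw [← e1, ← e2, pv_order_eq_ofList]
  set la := pouleA.map pvClub with hla
  set lb := pouleB.map pvClub with hlb
  set d1 : PySem.Dict String (List Int) := la.foldl (fun d c => d.modify c [0,0] (fun v => [v.getD 0 0 + 1, v.getD 1 0])) PySem.Dict.empty with hd1
  set d2 : PySem.Dict String (List Int) := lb.foldl (fun d c => d.modify c [0,0] (fun v => [v.getD 0 0, v.getD 1 0 + 1])) d1 with hd2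
  have hempty : ∀ j : String, ∃ a b : Int, (PySem.Dict.empty : PySem.Dict String (List Int)).getD j [0,0] = [a,b] := by
    intro j; exact ⟨0, 0, by simp [PySem.Dict.getD_empty]⟩
  have h1 : ∀ j, d1.getD j [0,0] = [(la.count j : Int), 0] := by
    intro j
    rw [hd1, pv_getD_fold1 la _ hempty j]
    simp [PySem.Dict.getD_empty]
  have h1' : ∀ j : String, ∃ a b : Int, d1.getD j [0,0] = [a,b] := by
    intro j; exact ⟨_, _, h1 j⟩
  have h2 : ∀ j, d2.getD j [0,0] = [(la.count j : Int), (lb.count j : Int)] := by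
    intro j
    rw [hd2, pv_getD_fold2 lb d1 h1' j, h1 j]
    simp
  have hkeys : d2.keys = PySem.Set.ofList (la ++ lb) := by
    rw [hd2, PySem.Dict.keys_foldl_modify, hd1, PySem.Dict.keys_foldl_modify]
    rw [PySem.Dict.keys_empty, PySem.Set.update_nil_left, PySem.Set.ofList_append]
  have hnd : d2.keys.Nodup := by rw [hkeys]; exact PySem.Set.nodup_ofList _
  rw [PySem.Dict.items_eq_map_keys d2 hnd [0,0], hkeys]
  apply List.map_congr_left
  intro k _
  rw [h2 k]
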